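-- pv_equiv track=rewrite | github.com/YuriAoto/grassmann | src/absil.py | calc_storage_CISD
-- ===== SOURCE A (Python) =====
-- def calc_storage_CISD(occ, corr, virt):
--     """
--     Calculates the storage needed for the algorithm for CISD wave functions
--     """
--     n_inp = 1
--     n_out = Fs = Gd = G0 = Gs = bigG = H = others = 0
--     for irrep in range(len(occ)):
--         nv = corr[irrep] * virt[irrep]
--         nK = occ[irrep] * (virt[irrep] + occ[irrep])
--         n_inp += nK  # Y
--         n_inp += nv  # singles
--         n_inp += (virt[irrep]**2) * corr[irrep] * (corr[irrep] + 1) // 2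
--         n_inp += (corr[irrep] * (corr[irrep] - 1)
--                   * virt[irrep] * (virt[irrep] - 1)) // 4
--         for irrep2 in range(irrep):
--             n_inp += nv * corr[irrep2] * virt[irrep2]
--         n_out += nK
--         Fs += nv
--         Gs += nv * nK
--         Gd = max(Gd, nK)
--         H = max(H, nK**2)
--         others = max(others, nv)
--     G0 = n_out
--     bigG = H
--     n_out = n_out * (n_out + 1)
--     others += 2 * (1 + len(occ) + len(occ)**2)
--     total = n_inp + n_out + Fs + Gd + G0 + Gs + bigG + H + others
--     return (n_inp, n_out, Fs, Gd, G0, Gs, bigG, H, others, total)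
-- ===== SOURCE B (Python) =====
-- def calc_storage_CISD(occ, corr, virt):
--     """Staged passes over zipped per-irrep lists; the pairwise cross term is the
--     closed form (S*S - Q)//2 with S = sum(nv), Q = sum(nv_i**2)."""
--     trip = list(zip(occ, corr, virt))
--     nv = [c * v for _, c, v in trip]
--     nK = [o * (v + o) for o, _, v in trip]
--     S = sum(nv)
--     Q = sum(x * x for x in nv)
--     cross = (S * S - Q) // 2
--     quart = sum(v * v * c * (c + 1) // 2 + c * (c - 1) * v * (v - 1) // 4
--                 for _, c, v in trip)
--     n_inp = 1 + sum(nK) + S + quart + cross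
--     base = sum(nK)
--     Gd = max([0] + nK)
--     H = max([0] + [k * k for k in nK])
--     Gs = sum(a * b for a, b in zip(nv, nK))
--     others = max([0] + nv) + 2 * (1 + len(occ) + len(occ) ** 2)
--     n_out = base * (base + 1)
--     total = n_inp + n_out + S + Gd + base + Gs + H + H + others
--     return (n_inp, n_out, S, Gd, base, Gs, H, H, others, total)
-- ===== Notes on version B (the rewrite author's own statement) =====
-- stated objective: faster
-- what changed: Replaced the single indexed loop with a quadratic inner rescan by staged comprehension passes over zipped lists, computing the pairwise cross term by the closed form (S^2 - sum nv_i^2)//2.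
-- outside the precondition, e.g. on calc_storage_CISD([1], [], []): A raises IndexError, B returns (1, 0, 0, 0, 0, 0, 0, 0, 6, 7)
import Mathlib
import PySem

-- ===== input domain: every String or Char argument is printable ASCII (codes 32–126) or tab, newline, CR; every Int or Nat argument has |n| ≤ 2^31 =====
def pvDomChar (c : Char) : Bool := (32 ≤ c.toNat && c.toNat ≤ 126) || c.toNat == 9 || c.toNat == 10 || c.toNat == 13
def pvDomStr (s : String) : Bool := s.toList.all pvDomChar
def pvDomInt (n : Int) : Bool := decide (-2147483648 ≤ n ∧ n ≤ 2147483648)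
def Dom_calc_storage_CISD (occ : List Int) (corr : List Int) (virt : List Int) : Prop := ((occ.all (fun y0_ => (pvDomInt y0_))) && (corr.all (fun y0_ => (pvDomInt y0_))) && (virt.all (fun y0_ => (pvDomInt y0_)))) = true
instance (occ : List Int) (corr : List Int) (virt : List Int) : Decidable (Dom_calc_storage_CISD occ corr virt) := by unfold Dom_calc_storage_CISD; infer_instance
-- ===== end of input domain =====

-- B replaces A's indexed loop with its quadratic inner rescan by staged map/sum passes over
-- zipped lists; the pairwise cross term becomes the closed form (S^2 - sum nv_i^2)//2 (faster).

-- ===== PORT A =====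
-- Literal port of A; loop state is (n_inp, n_out, Fs, Gd, Gs, H, others); indexing uses
-- pyGetD (Pre_ guarantees every index is in range, where pyGetD equals Python's xs[i]).
def calc_storage_CISD_stepA (occ corr virt : List Int)
    (st : Int × Int × Int × Int × Int × Int × Int) (irrep : Int) :
    Int × Int × Int × Int × Int × Int × Int :=
  let (n_inp, n_out, Fs, Gd, Gs, H, others) := st
  let nv := PySem.List.pyGetD corr irrep 0 * PySem.List.pyGetD virt irrep 0
  let nK := PySem.List.pyGetD occ irrep 0 *
      (PySem.List.pyGetD virt irrep 0 + PySem.List.pyGetD occ irrep 0)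
  let n_inp := n_inp + nK
  let n_inp := n_inp + nv
  let n_inp := n_inp + PySem.Int.floordiv
      ((PySem.List.pyGetD virt irrep 0) ^ 2 * PySem.List.pyGetD corr irrep 0 *
        (PySem.List.pyGetD corr irrep 0 + 1)) 2
  let n_inp := n_inp + PySem.Int.floordiv
      (PySem.List.pyGetD corr irrep 0 * (PySem.List.pyGetD corr irrep 0 - 1) *
        PySem.List.pyGetD virt irrep 0 * (PySem.List.pyGetD virt irrep 0 - 1)) 4
  let n_inp := (PySem.List.pyRange 0 irrep 1).foldl
      (fun acc irrep2 =>
        acc + nv * PySem.List.pyGetD corr irrep2 0 * PySem.List.pyGetD virt irrep2 0) n_inp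
  (n_inp, n_out + nK, Fs + nv, max Gd nK, Gs + nv * nK, max H (nK ^ 2), max others nv)

def calc_storage_CISD (occ : List Int) (corr : List Int) (virt : List Int) : List Int :=
  let s := (PySem.List.pyRange 0 (occ.length : Int) 1).foldl
      (calc_storage_CISD_stepA occ corr virt) (1, 0, 0, 0, 0, 0, 0)
  let (n_inp, n_out, Fs, Gd, Gs, H, others) := s
  let G0 := n_out
  let bigG := H
  let n_out := n_out * (n_out + 1)
  let others := others + 2 * (1 + (occ.length : Int) + (occ.length : Int) ^ 2)
  let total := n_inp + n_out + Fs + Gd + G0 + Gs + bigG + H + others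
  [n_inp, n_out, Fs, Gd, G0, Gs, bigG, H, others, total]

-- ===== PORT B =====
-- Port of Source B: staged passes — zip once, map out nv/nK, then sums, foldl-max
-- (Python's max([0]+xs)), and the closed-form cross term (S*S - Q) // 2.
def calc_storage_CISD_alt (occ : List Int) (corr : List Int) (virt : List Int) : List Int :=
  let trip := occ.zip (corr.zip virt)
  let nv := trip.map (fun p => p.2.1 * p.2.2)
  let nK := trip.map (fun p => p.1 * (p.2.2 + p.1))
  let S := nv.sum
  let Q := (nv.map (fun x => x * x)).sum
  let cross := PySem.Int.floordiv (S * S - Q) 2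
  let quart := (trip.map (fun p =>
      PySem.Int.floordiv (p.2.2 * p.2.2 * p.2.1 * (p.2.1 + 1)) 2
      + PySem.Int.floordiv (p.2.1 * (p.2.1 - 1) * p.2.2 * (p.2.2 - 1)) 4)).sum
  let n_inp := 1 + nK.sum + S + quart + cross
  let base := nK.sum
  let Gd := nK.foldl max 0
  let H := (nK.map (fun k => k * k)).foldl max 0
  let Gs := ((nv.zip nK).map (fun p => p.1 * p.2)).sum
  let others := nv.foldl max 0 + 2 * (1 + (occ.length : Int) + (occ.length : Int) ^ 2)
  let n_out := base * (base + 1)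
  let total := n_inp + n_out + S + Gd + base + Gs + H + H + others
  [n_inp, n_out, S, Gd, base, Gs, H, H, others, total]

-- ===== PRECONDITION & SPEC =====
-- Python A raises IndexError when corr or virt is shorter than occ; exactly those inputs are excluded.
def Pre_calc_storage_CISD (occ : List Int) (corr : List Int) (virt : List Int) : Prop :=
  occ.length ≤ corr.length ∧ occ.length ≤ virt.length
instance (occ : List Int) (corr : List Int) (virt : List Int) : Decidable (Pre_calc_storage_CISD occ corr virt) := by unfold Pre_calc_storage_CISD; infer_instance

def pvWitness_calc_storage_CISD : List Int × List Int × List Int := ([2, 1], [1, 1], [3, 2])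

def Spec_calc_storage_CISD (occ : List Int) (corr : List Int) (virt : List Int) (out : List Int) : Prop := out = calc_storage_CISD_alt occ corr virt
instance (occ : List Int) (corr : List Int) (virt : List Int) (out : List Int) : Decidable (Spec_calc_storage_CISD occ corr virt out) := by unfold Spec_calc_storage_CISD; infer_instance

-- ===== CLAIM (what is proved, stated in full; the proofs are below) =====
def Claim_equal_calc_storage_CISD : Prop := ∀ (occ : List Int) (corr : List Int) (virt : List Int), Dom_calc_storage_CISD occ corr virt → Pre_calc_storage_CISD occ corr virt → Spec_calc_storage_CISD occ corr virt (calc_storage_CISD occ corr virt)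

-- ===== LEMMAS AND PROOFS =====

-- per-triple quantities of B, named for the proofs
def pvFnv (p : Int × Int × Int) : Int := p.2.1 * p.2.2
def pvFnK (p : Int × Int × Int) : Int := p.1 * (p.2.2 + p.1)
def pvFq (p : Int × Int × Int) : Int :=
  PySem.Int.floordiv (p.2.2 * p.2.2 * p.2.1 * (p.2.1 + 1)) 2
  + PySem.Int.floordiv (p.2.1 * (p.2.1 - 1) * p.2.2 * (p.2.2 - 1)) 4

-- cross-term accumulator: (running cross sum, running prefix sum)
def pvStep (st : Int × Int) (x : Int) : Int × Int := (st.1 + x * st.2, st.2 + x)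
def pvCA (l : List Int) : Int := (l.foldl pvStep (0, 0)).1

lemma pvStep_snd (l : List Int) (a s : Int) : (l.foldl pvStep (a, s)).2 = s + l.sum := by
  induction l generalizing a s with
  | nil => simp
  | cons x t ih => simp [pvStep, ih]; omega

lemma pvCA_append (l : List Int) (x : Int) : pvCA (l ++ [x]) = pvCA l + x * l.sum := by
  unfold pvCA
  rw [List.foldl_append]
  rcases h : l.foldl pvStep (0, 0) with ⟨a, s⟩
  have := pvStep_snd l 0 0
  rw [h] at this
  simp at this
  simp [pvStep, this]

lemma pvCA_closed_aux (l : List Int) (a s : Int) :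
    2 * (l.foldl pvStep (a, s)).1
      = 2 * a + (s + l.sum) * (s + l.sum) - s * s - (l.map (fun x => x * x)).sum := by
  induction l generalizing a s with
  | nil => simp
  | cons x t ih => simp [pvStep, ih]; ring

lemma pvCA_closed (l : List Int) :
    2 * pvCA l = l.sum * l.sum - (l.map (fun x => x * x)).sum := by
  have := pvCA_closed_aux l 0 0
  simpa [pvCA] using this

-- A's whole loop state expressed out of the zipped list
def pvAgg (l : List (Int × Int × Int)) : Int × Int × Int × Int × Int × Int × Int :=
  (1 + (l.map pvFnK).sum + (l.map pvFnv).sum + (l.map pvFq).sum + pvCA (l.map pvFnv),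
   (l.map pvFnK).sum,
   (l.map pvFnv).sum,
   (l.map pvFnK).foldl max 0,
   (l.map (fun p => pvFnv p * pvFnK p)).sum,
   (l.map (fun p => pvFnK p * pvFnK p)).foldl max 0,
   (l.map pvFnv).foldl max 0)

-- A's inner loop adds nv * (prefix sum) in one go
lemma inner_loop_eq (corr virt : List Int) (nv : Int) (m : Nat) (acc : Int) :
    (PySem.List.pyRange 0 (m : Int) 1).foldl
      (fun a j => a + nv * PySem.List.pyGetD corr j 0 * PySem.List.pyGetD virt j 0) acc
      = acc + nv * ((PySem.List.pyRange 0 (m : Int) 1).map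
          (fun j => PySem.List.pyGetD corr j 0 * PySem.List.pyGetD virt j 0)).sum := by
  induction m generalizing acc with
  | zero => simp
  | succ k ih =>
      rw [show ((k + 1 : Nat) : Int) = (k : Int) + 1 by push_cast; ring,
        PySem.List.pyRange_one_succ_right (Int.natCast_nonneg k), List.foldl_append, ih]
      simp only [List.foldl_cons, List.foldl_nil, List.map_append, List.sum_append,
        List.map_cons, List.map_nil, List.sum_cons, List.sum_nil]
      ring

lemma main_loop_eq (occ corr virt : List Int) (m : Nat)
    (h1 : m ≤ occ.length) (h2 : m ≤ corr.length) (h3 : m ≤ virt.length) :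
    (PySem.List.pyRange 0 (m : Int) 1).foldl
        (calc_storage_CISD_stepA occ corr virt) (1, 0, 0, 0, 0, 0, 0)
      = pvAgg ((occ.zip (corr.zip virt)).take m) := by
  induction m with
  | zero => simp [pvAgg, pvCA]
  | succ k ih =>
      have hk1 : k ≤ occ.length := Nat.le_of_succ_le h1
      have hk2 : k ≤ corr.length := Nat.le_of_succ_le h2
      have hk3 : k ≤ virt.length := Nat.le_of_succ_le h3
      have hklen : k < (occ.zip (corr.zip virt)).length := by
        simp [List.length_zip]; try omega
      have hget : (occ.zip (corr.zip virt))[k] =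
          (occ[k]'(by omega), corr[k]'(by omega), virt[k]'(by omega)) := by
        simp [List.getElem_zip]
      have go : PySem.List.pyGetD occ (k : Int) 0 = occ[k]'(by omega) := by
        rw [PySem.List.pyGetD_eq_getElem _ _ (by omega) (by simp; omega)]; simp
      have gc : PySem.List.pyGetD corr (k : Int) 0 = corr[k]'(by omega) := by
        rw [PySem.List.pyGetD_eq_getElem _ _ (by omega) (by simp; omega)]; simp
      have gv : PySem.List.pyGetD virt (k : Int) 0 = virt[k]'(by omega) := by
        rw [PySem.List.pyGetD_eq_getElem _ _ (by omega) (by simp; omega)]; simp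
      -- prefix sum over range k equals the map-sum over the taken zip
      have hpre : ∀ i : Nat, i ≤ occ.length → i ≤ corr.length → i ≤ virt.length →
          ((PySem.List.pyRange 0 (i : Int) 1).map
            (fun j => PySem.List.pyGetD corr j 0 * PySem.List.pyGetD virt j 0)).sum
          = (((occ.zip (corr.zip virt)).take i).map pvFnv).sum := by
        intro i hi1' hi2' hi3'
        induction i with
        | zero => simp
        | succ i ihh =>
            have hi1 : i ≤ occ.length := by omega
            have hi2 : i ≤ corr.length := by omega
            have hi3 : i ≤ virt.length := by omega
            have hilen : i < (occ.zip (corr.zip virt)).length := by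
              simp [List.length_zip]; try omega
            have hgi : (occ.zip (corr.zip virt))[i] =
                (occ[i]'(by omega), corr[i]'(by omega), virt[i]'(by omega)) := by
              simp [List.getElem_zip]
            have gci : PySem.List.pyGetD corr (i : Int) 0 = corr[i]'(by omega) := by
              rw [PySem.List.pyGetD_eq_getElem _ _ (by omega) (by simp; omega)]; simp
            have gvi : PySem.List.pyGetD virt (i : Int) 0 = virt[i]'(by omega) := by
              rw [PySem.List.pyGetD_eq_getElem _ _ (by omega) (by simp; omega)]; simp
            rw [show ((i + 1 : Nat) : Int) = (i : Int) + 1 by push_cast; ring,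
              PySem.List.pyRange_one_succ_right (Int.natCast_nonneg i),
              List.take_add_one, List.getElem?_eq_getElem hilen]
            simp only [List.map_append, List.sum_append, hgi]
            rw [ihh hi1 hi2 hi3]
            simp [pvFnv, gci, gvi]
      rw [show ((k + 1 : Nat) : Int) = (k : Int) + 1 by push_cast; ring,
        PySem.List.pyRange_one_succ_right (Int.natCast_nonneg k), List.foldl_append, ih hk1 hk2 hk3,
        List.take_add_one, List.getElem?_eq_getElem hklen]
      simp only [Option.toList_some, List.foldl_cons, List.foldl_nil, hget]
      simp only [calc_storage_CISD_stepA, pvAgg, inner_loop_eq, go, gc, gv, hpre k hk1 hk2 hk3,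
        List.map_append, List.sum_append, List.foldl_append, List.map_cons, List.map_nil,
        List.sum_cons, List.sum_nil, List.foldl_cons, List.foldl_nil, pvCA_append,
        pvFnv, pvFnK, pvFq, pow_two, Prod.mk.injEq]
      and_intros <;> first | ring | trivial

-- ===== VERDICT (by name: the statement is the Claim_ definition above) =====
theorem calc_storage_CISD_spec : Claim_equal_calc_storage_CISD := by
  intro occ corr virt _hdom hpre
  obtain ⟨h2, h3⟩ := hpre
  unfold Spec_calc_storage_CISD calc_storage_CISD calc_storage_CISD_alt
  have hfull : (occ.zip (corr.zip virt)).take occ.length = occ.zip (corr.zip virt) := by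
    apply List.take_of_length_le
    simp [List.length_zip]; try omega
  have hmain := main_loop_eq occ corr virt occ.length le_rfl h2 h3
  rw [hfull] at hmain
  rw [hmain]
  -- identify B's staged quantities with pvAgg's components
  set l := occ.zip (corr.zip virt) with hl
  have hcross : PySem.Int.floordiv
      ((l.map pvFnv).sum * (l.map pvFnv).sum - ((l.map pvFnv).map (fun x => x * x)).sum) 2
      = pvCA (l.map pvFnv) := by
    have h2CA := pvCA_closed (l.map pvFnv)
    rw [show (l.map pvFnv).sum * (l.map pvFnv).sum
        - ((l.map pvFnv).map (fun x => x * x)).sum = 2 * pvCA (l.map pvFnv) from by omega]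
    rw [PySem.Int.floordiv_eq_ediv_of_pos (by norm_num)]
    omega
  have hGs : ((l.map pvFnv).zip (l.map pvFnK)).map (fun p => p.1 * p.2)
      = l.map (fun p => pvFnv p * pvFnK p) := by
    rw [List.zip_map']; simp
  simp only [pvAgg]
  simp only [show (fun (p : Int × Int × Int) => p.2.1 * p.2.2) = pvFnv from rfl,
    show (fun (p : Int × Int × Int) => p.1 * (p.2.2 + p.1)) = pvFnK from rfl,
    show (fun (p : Int × Int × Int) =>
      PySem.Int.floordiv (p.2.2 * p.2.2 * p.2.1 * (p.2.1 + 1)) 2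
      + PySem.Int.floordiv (p.2.1 * (p.2.1 - 1) * p.2.2 * (p.2.2 - 1)) 4) = pvFq from rfl,
    hcross, hGs]
  have hmaps : l.map (fun p => pvFnK p * pvFnK p) = (l.map pvFnK).map (fun k => k * k) := by
    simp
  rw [hmaps]
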